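-- pv_equiv track=rewrite | github.com/irenezhengg/111-1-Programming | Week10/030.py | dapatkanSkorHuruf
-- ===== SOURCE A (Python) =====
-- def dapatkanSkorHuruf(string):
--     nilai = 0
--     nomor2 = 0
--     nomorSebelumnya = False
--     for huruf in string:
--         if huruf.islower():
--                 nomorSebelumnya = False
--                 nilai += 1
--         if huruf.isupper():
--             nomorSebelumnya = False
--             nilai += 3
--         if huruf.isnumeric():
--             if nomorSebelumnya:
--                 nomor2 = 0
--             else:
--                 nomor2 += 1
--                 nomorSebelumnya = True
--             nilai += 2
--         if huruf == '{' or huruf == '~' or huruf == '!' or huruf == '@' or huruf == '#' or huruf == '$' or huruf == '%' or huruf == '^' or huruf == '&' or huruf == '*' or huruf == '<' or huruf == '>' or huruf == '_' or huruf == '+' or huruf == '=' or huruf == '}':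
--             nomorSebelumnya = False
--             nilai +=5
--
--         if nomor2 == 5:
--             nomor2 = 0
--             nilai += 15
--
--     return nilai
-- ===== SOURCE B (Python) =====
-- SPECIALS = "{~!@#$%^&*<>_+=}"
--
-- def _charValue(c):
--     if c.islower():
--         return 1
--     if c.isupper():
--         return 3
--     if c.isnumeric():
--         return 2
--     if c in SPECIALS:
--         return 5
--     return 0
--
-- def dapatkanSkorHuruf(string):
--     base = sum(_charValue(c) for c in string)
--     bonus = 0
--     cnt = 0
--     prevNumeric = False
--     for c in string:
--         if c.isnumeric():
--             cnt = 0 if prevNumeric else cnt + 1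
--             prevNumeric = True
--             if cnt == 5:
--                 cnt = 0
--                 bonus += 15
--         elif c.islower() or c.isupper() or c in SPECIALS:
--             prevNumeric = False
--     return base + bonus
-- ===== Notes on version B (the rewrite author's own statement) =====
-- stated objective: alternative
-- what changed: A's single loop threading score and bonus state together is split into a stateless per-character value sum plus a separate pass that runs only the numeric-streak bonus state machine; the special-character test becomes membership in a constant string instead of a 16-way or-chain.
import Mathlib
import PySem

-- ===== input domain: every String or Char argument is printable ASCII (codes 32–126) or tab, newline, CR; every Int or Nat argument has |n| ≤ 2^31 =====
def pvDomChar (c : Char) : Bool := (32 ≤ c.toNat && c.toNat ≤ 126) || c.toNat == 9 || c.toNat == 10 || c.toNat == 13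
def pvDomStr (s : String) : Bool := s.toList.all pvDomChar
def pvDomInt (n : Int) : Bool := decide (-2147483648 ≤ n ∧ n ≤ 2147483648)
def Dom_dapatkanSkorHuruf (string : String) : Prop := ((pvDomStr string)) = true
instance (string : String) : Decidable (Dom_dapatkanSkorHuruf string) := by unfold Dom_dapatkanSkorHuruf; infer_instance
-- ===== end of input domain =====

-- B replaces A's single stateful loop by a stateless per-character value sum plus a
-- separate pass running only the numeric-bonus state machine (objective: alternative decomposition).

-- ===== PORT A =====
def pvSpecialA (huruf : Char) : Bool :=
  huruf == '{' || huruf == '~' || huruf == '!' || huruf == '@' || huruf == '#' ||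
  huruf == '$' || huruf == '%' || huruf == '^' || huruf == '&' || huruf == '*' ||
  huruf == '<' || huruf == '>' || huruf == '_' || huruf == '+' || huruf == '=' || huruf == '}'

def pvStepA (st : Int × Int × Bool) (huruf : Char) : Int × Int × Bool :=
  let prev1 := if PySem.Chars.islower huruf then false else st.2.2
  let nilai1 := if PySem.Chars.islower huruf then st.1 + 1 else st.1
  let prev2 := if PySem.Chars.isupper huruf then false else prev1
  let nilai2 := if PySem.Chars.isupper huruf then nilai1 + 3 else nilai1
  let nomor3 := if PySem.Chars.isdigit huruf then (if prev2 then 0 else st.2.1 + 1) else st.2.1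
  let prev3 := if PySem.Chars.isdigit huruf then true else prev2
  let nilai3 := if PySem.Chars.isdigit huruf then nilai2 + 2 else nilai2
  let prev4 := if pvSpecialA huruf then false else prev3
  let nilai4 := if pvSpecialA huruf then nilai3 + 5 else nilai3
  let nomor5 := if nomor3 == (5 : Int) then (0 : Int) else nomor3
  let nilai5 := if nomor3 == (5 : Int) then nilai4 + 15 else nilai4
  (nilai5, nomor5, prev4)

def dapatkanSkorHuruf (string : String) : Int :=
  (string.toList.foldl pvStepA (0, 0, false)).1

-- ===== PORT B =====
def pvSpecials : List Char := "{~!@#$%^&*<>_+=}".toList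

def pvCharValue (c : Char) : Int :=
  if PySem.Chars.islower c then 1
  else if PySem.Chars.isupper c then 3
  else if PySem.Chars.isdigit c then 2
  else if pvSpecials.contains c then 5
  else 0

-- state: (bonus, cnt, prevNumeric)
def pvStepB (st : Int × Int × Bool) (c : Char) : Int × Int × Bool :=
  if PySem.Chars.isdigit c then
    let cnt1 := if st.2.2 then 0 else st.2.1 + 1
    if cnt1 == (5 : Int) then (st.1 + 15, 0, true) else (st.1, cnt1, true)
  else if PySem.Chars.islower c || PySem.Chars.isupper c || pvSpecials.contains c then
    (st.1, st.2.1, false)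
  else st

def dapatkanSkorHuruf_alt (string : String) : Int :=
  string.toList.foldl (fun acc c => acc + pvCharValue c) 0
    + (string.toList.foldl pvStepB (0, 0, false)).1

-- ===== PRECONDITION & SPEC =====
def Spec_dapatkanSkorHuruf (string : String) (out : Int) : Prop := out = dapatkanSkorHuruf_alt string
instance (string : String) (out : Int) : Decidable (Spec_dapatkanSkorHuruf string out) := by unfold Spec_dapatkanSkorHuruf; infer_instance

-- ===== CLAIM (what is proved, stated in full; the proofs are below) =====
def Claim_equal_dapatkanSkorHuruf : Prop := ∀ (string : String), Dom_dapatkanSkorHuruf string → Spec_dapatkanSkorHuruf string (dapatkanSkorHuruf string)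

-- ===== LEMMAS AND PROOFS =====

theorem contains_eq_specialA (c : Char) : pvSpecials.contains c = pvSpecialA c := by
  have hs : pvSpecials = ['{','~','!','@','#','$','%','^','&','*','<','>','_','+','=','}'] := rfl
  rw [Bool.eq_iff_iff]
  simp [hs, pvSpecialA]
  tauto

theorem disj_LU (c : Char) (h : PySem.Chars.islower c = true) : PySem.Chars.isupper c = false := by
  have e1 : 'a'.val.toNat = 97 := rfl
  have e2 : 'z'.val.toNat = 122 := rfl
  have e3 : 'A'.val.toNat = 65 := rfl
  have e4 : 'Z'.val.toNat = 90 := rfl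
  simp only [PySem.Chars.islower, PySem.Chars.isupper, Char.le_def, UInt32.le_iff_toNat_le,
    Bool.and_eq_true, decide_eq_true_eq, Bool.and_eq_false_iff, decide_eq_false_iff_not, not_le,
    e1, e2, e3, e4] at *
  omega

theorem disj_LD (c : Char) (h : PySem.Chars.islower c = true) : PySem.Chars.isdigit c = false := by
  have e1 : 'a'.val.toNat = 97 := rfl
  have e2 : 'z'.val.toNat = 122 := rfl
  have e3 : '0'.val.toNat = 48 := rfl
  have e4 : '9'.val.toNat = 57 := rfl
  simp only [PySem.Chars.islower, PySem.Chars.isdigit, Char.le_def, UInt32.le_iff_toNat_le,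
    Bool.and_eq_true, decide_eq_true_eq, Bool.and_eq_false_iff, decide_eq_false_iff_not, not_le,
    e1, e2, e3, e4] at *
  omega

theorem disj_UD (c : Char) (h : PySem.Chars.isupper c = true) : PySem.Chars.isdigit c = false := by
  have e1 : 'A'.val.toNat = 65 := rfl
  have e2 : 'Z'.val.toNat = 90 := rfl
  have e3 : '0'.val.toNat = 48 := rfl
  have e4 : '9'.val.toNat = 57 := rfl
  simp only [PySem.Chars.isupper, PySem.Chars.isdigit, Char.le_def, UInt32.le_iff_toNat_le,
    Bool.and_eq_true, decide_eq_true_eq, Bool.and_eq_false_iff, decide_eq_false_iff_not, not_le,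
    e1, e2, e3, e4] at *
  omega

theorem specialA_cases (c : Char) (h : pvSpecialA c = true) :
    PySem.Chars.islower c = false ∧ PySem.Chars.isupper c = false ∧ PySem.Chars.isdigit c = false := by
  simp only [pvSpecialA, Bool.or_eq_true, beq_iff_eq] at h
  rcases h with (((((((((((((((h|h)|h)|h)|h)|h)|h)|h)|h)|h)|h)|h)|h)|h)|h)|h) <;> subst h <;>
    exact ⟨by decide, by decide, by decide⟩

theorem mem_specials (c : Char) : c ∈ pvSpecials ↔ pvSpecialA c = true := by
  rw [← contains_eq_specialA]
  exact (List.contains_iff_mem).symm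

-- one step, from a state with cnt ≠ 5: both machines move in lockstep
theorem step_char (c : Char) (nilai cnt : Int) (prev : Bool) (h : cnt ≠ 5) :
    pvStepA (nilai, cnt, prev) c =
      (nilai + pvCharValue c + (pvStepB (0, cnt, prev) c).1,
       (pvStepB (0, cnt, prev) c).2.1, (pvStepB (0, cnt, prev) c).2.2)
    ∧ (pvStepB (0, cnt, prev) c).2.1 ≠ 5 := by
  by_cases hD : PySem.Chars.isdigit c = true
  · have hL : PySem.Chars.islower c = false := by
      by_cases hl : PySem.Chars.islower c = true
      · rw [disj_LD c hl] at hD; exact absurd hD (by simp)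
      · simpa using hl
    have hU : PySem.Chars.isupper c = false := by
      by_cases hu : PySem.Chars.isupper c = true
      · rw [disj_UD c hu] at hD; exact absurd hD (by simp)
      · simpa using hu
    have hS : pvSpecialA c = false := by
      by_cases hs : pvSpecialA c = true
      · exact absurd hD (by simp [(specialA_cases c hs).2.2])
      · simpa using hs
    cases prev with
    | true =>
      simp [pvStepA, pvStepB, pvCharValue, hD, hL, hU, hS]
    | false =>
      by_cases h5 : cnt + 1 = 5 <;>
        simp [pvStepA, pvStepB, pvCharValue, hD, hL, hU, hS, h5]
  · have hD' : PySem.Chars.isdigit c = false := by simpa using hD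
    by_cases hL : PySem.Chars.islower c = true
    · have hU := disj_LU c hL
      have hS : pvSpecialA c = false := by
        by_cases hs : pvSpecialA c = true
        · exact absurd hL (by simp [(specialA_cases c hs).1])
        · simpa using hs
      simp [pvStepA, pvStepB, pvCharValue, mem_specials, hD', hL, hU, hS, h]
    · have hL' : PySem.Chars.islower c = false := by simpa using hL
      by_cases hU : PySem.Chars.isupper c = true
      · have hS : pvSpecialA c = false := by
          by_cases hs : pvSpecialA c = true
          · exact absurd hU (by simp [(specialA_cases c hs).2.1])
          · simpa using hs
        simp [pvStepA, pvStepB, pvCharValue, mem_specials, hD', hL', hU, hS, h]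
      · have hU' : PySem.Chars.isupper c = false := by simpa using hU
        by_cases hS : pvSpecialA c = true <;>
          simp [pvStepA, pvStepB, pvCharValue, mem_specials, hD', hL', hU', hS, h]

theorem stepB_shift (l : List Char) (b cnt : Int) (prev : Bool) :
    l.foldl pvStepB (b, cnt, prev) =
      (b + (l.foldl pvStepB (0, cnt, prev)).1,
       (l.foldl pvStepB (0, cnt, prev)).2.1, (l.foldl pvStepB (0, cnt, prev)).2.2) := by
  induction l generalizing b cnt prev with
  | nil => simp
  | cons c rest ih =>
    simp only [List.foldl_cons]
    have hstep : pvStepB (b, cnt, prev) c =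
        (b + (pvStepB (0, cnt, prev) c).1,
         (pvStepB (0, cnt, prev) c).2.1, (pvStepB (0, cnt, prev) c).2.2) := by
      simp only [pvStepB]
      split_ifs <;> simp
    rw [hstep]
    rcases hB : pvStepB (0, cnt, prev) c with ⟨b1, cnt1, prev1⟩
    simp only
    rw [ih (b + b1) cnt1 prev1, ih b1 cnt1 prev1]
    simp [Prod.mk.injEq] <;> omega

theorem base_shift (l : List Char) (a : Int) :
    l.foldl (fun acc c => acc + pvCharValue c) a = a + l.foldl (fun acc c => acc + pvCharValue c) 0 := by
  induction l generalizing a with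
  | nil => simp
  | cons c rest ih =>
    simp only [List.foldl_cons]
    rw [ih (a + pvCharValue c), ih (0 + pvCharValue c)]
    omega

theorem key (l : List Char) (nilai cnt : Int) (prev : Bool) (h : cnt ≠ 5) :
    l.foldl pvStepA (nilai, cnt, prev) =
      (nilai + l.foldl (fun acc c => acc + pvCharValue c) 0 + (l.foldl pvStepB (0, cnt, prev)).1,
       (l.foldl pvStepB (0, cnt, prev)).2.1, (l.foldl pvStepB (0, cnt, prev)).2.2) := by
  induction l generalizing nilai cnt prev with
  | nil => simp
  | cons c rest ih =>
    obtain ⟨hA, h5⟩ := step_char c nilai cnt prev h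
    simp only [List.foldl_cons]
    rw [hA]
    rcases hB : pvStepB (0, cnt, prev) c with ⟨b1, cnt1, prev1⟩
    rw [hB] at h5
    simp only at h5 ⊢
    rw [ih (nilai + pvCharValue c + b1) cnt1 prev1 h5]
    rw [stepB_shift rest b1 cnt1 prev1]
    rw [base_shift rest (0 + pvCharValue c)]
    simp [Prod.mk.injEq] <;> omega

-- ===== VERDICT (by name: the statement is the Claim_ definition above) =====
theorem dapatkanSkorHuruf_spec : Claim_equal_dapatkanSkorHuruf := by
  intro s _
  unfold Spec_dapatkanSkorHuruf dapatkanSkorHuruf dapatkanSkorHuruf_alt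
  rw [key s.toList 0 0 false (by omega)]
  simp
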